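-- pv_equiv track=rewrite | github.com/UIKTP/Smart-pdf-summarizer | main.py | simple_qa
-- ===== SOURCE A (Python) =====
-- from typing import List, Dict
--
-- def simple_qa(query: str, chunks: List[str]) -> str:
--     """
--     Perform a simple keyword-based search to answer a query.
--     """
--     query_words = set(query.lower().split())
--     best_match = None
--     max_overlap = 0
--
--     for chunk in chunks:
--         chunk_words = set(chunk.lower().split())
--         overlap = len(query_words.intersection(chunk_words))
--         if overlap > max_overlap:
--             max_overlap = overlap
--             best_match = chunk
--
--     if best_match:
--         return best_match[:500] + "..." if len(best_match) > 500 else best_match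
--     return "No relevant information found in the PDF."
-- ===== SOURCE B (Python) =====
-- def simple_qa(query, chunks):
--     # Inverted index: word -> list of chunk indices containing it (each index once per word)
--     index = {}
--     for i, chunk in enumerate(chunks):
--         for w in set(chunk.lower().split()):
--             index.setdefault(w, []).append(i)
--     tally = [0] * len(chunks)
--     for w in set(query.lower().split()):
--         for i in index.get(w, []):
--             tally[i] += 1
--     best = 0
--     best_i = -1
--     for i, t in enumerate(tally):
--         if t > best:
--             best = t
--             best_i = i
--     if best_i < 0:
--         return "No relevant information found in the PDF."
--     bm = chunks[best_i]
--     return bm[:500] + "..." if len(bm) > 500 else bm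
-- ===== Notes on version B (the rewrite author's own statement) =====
-- stated objective: alternative
-- what changed: B builds an inverted index from lowercased word to the chunk indices containing it, accumulates per-chunk overlap tallies by iterating the distinct query words, and picks the first strictly-maximal nonzero tally, instead of A's per-chunk set intersection with a running best string.
import Mathlib
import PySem

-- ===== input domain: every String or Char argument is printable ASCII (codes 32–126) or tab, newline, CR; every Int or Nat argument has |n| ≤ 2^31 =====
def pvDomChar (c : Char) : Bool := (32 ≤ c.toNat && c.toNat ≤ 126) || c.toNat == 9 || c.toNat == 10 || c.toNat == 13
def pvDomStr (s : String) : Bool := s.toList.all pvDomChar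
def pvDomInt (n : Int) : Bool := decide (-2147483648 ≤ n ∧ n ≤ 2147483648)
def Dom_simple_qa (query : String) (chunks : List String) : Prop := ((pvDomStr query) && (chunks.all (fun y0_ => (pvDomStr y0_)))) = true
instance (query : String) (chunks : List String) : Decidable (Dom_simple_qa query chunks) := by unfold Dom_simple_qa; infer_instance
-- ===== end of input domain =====

-- B replaces A's per-chunk set-intersection scan with an inverted index (word -> chunk indices)
-- plus a tally/argmax pass: a different data organisation of the same exact search (objective: alternative).

-- set(s.lower().split()) — shared subexpression of both Pythons
def pvWords (s : String) : PySem.Set String :=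
  PySem.Set.ofList (PySem.Str.split₀ (PySem.Str.lower s))

-- 'bm[:500] + "..." if len(bm) > 500 else bm' — the shared return expression of both Pythons
def pvTrunc (bm : String) : String :=
  if PySem.Str.len bm > 500 then PySem.Str.slice bm none (some 500) ++ "..." else bm

-- ===== PORT A =====
def simple_qa (query : String) (chunks : List String) : String :=
  let query_words := pvWords query
  let st := chunks.foldl
    (fun (s : Option String × Int) chunk =>
      let chunk_words := pvWords chunk
      let overlap : Int := ((PySem.Set.inter query_words chunk_words).length : Int)
      if overlap > s.2 then (some chunk, overlap) else s)
    (none, 0)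
  match st.1 with
  | some bm => if bm ≠ "" then pvTrunc bm else "No relevant information found in the PDF."
  | none => "No relevant information found in the PDF."

-- ===== PORT B =====
def simple_qa_alt (query : String) (chunks : List String) : String :=
  let index : PySem.Dict String (List Int) :=
    (PySem.List.enumerate chunks).foldl
      (fun d p => (pvWords p.2).foldl
        (fun d w => d.insert w (d.getD w [] ++ [p.1])) d)
      PySem.Dict.empty
  let tally : List Int :=
    (pvWords query).foldl
      (fun t w => (index.getD w []).foldl
        -- 'tally[i] += 1': i is an index stored by enumerate, always ≥ 0, so .toNat is exact here
        (fun t i => t.modify i.toNat (· + 1)) t)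
      (List.replicate chunks.length 0)
  let best := (PySem.List.enumerate tally).foldl
    (fun (s : Int × Int) p => if p.2 > s.1 then (p.2, p.1) else s) (0, -1)
  if best.2 < 0 then "No relevant information found in the PDF."
  else pvTrunc ((PySem.List.pyGet? chunks best.2).getD "")

-- ===== PRECONDITION & SPEC =====
def Spec_simple_qa (query : String) (chunks : List String) (out : String) : Prop := out = simple_qa_alt query chunks
instance (query : String) (chunks : List String) (out : String) : Decidable (Spec_simple_qa query chunks out) := by unfold Spec_simple_qa; infer_instance

-- ===== CLAIM (what is proved, stated in full; the proofs are below) =====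
def Claim_equal_simple_qa : Prop := ∀ (query : String) (chunks : List String), Dom_simple_qa query chunks → Spec_simple_qa query chunks (simple_qa query chunks)

-- ===== LEMMAS AND PROOFS =====

-- the index lists produced for one chunk: each distinct word of the chunk gets i appended once
lemma pv_idx_inner (ws : List String) (d : PySem.Dict String (List Int)) (i : Int) (w : String) :
    ((ws.foldl (fun d w' => d.insert w' (d.getD w' [] ++ [i])) d).getD w [])
      = d.getD w [] ++ List.replicate (ws.count w) i := by
  induction ws generalizing d with
  | nil => simp
  | cons a t ih =>
    simp only [List.foldl_cons, ih, PySem.Dict.getD_insert, List.count_cons]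
    by_cases h : w = a
    · subst h
      simp [List.replicate_succ]
    · simp [h, Ne.symm h]

-- the indices a word maps to in the final inverted index
def pvIdx (chunks : List String) (w : String) : List Int :=
  ((PySem.List.enumerate chunks).filter (fun p => (pvWords p.2).contains w)).map (·.1)

lemma pv_idx_spec (ps : List (Int × String)) (d : PySem.Dict String (List Int)) (w : String) :
    (ps.foldl (fun d p => (pvWords p.2).foldl (fun d w' => d.insert w' (d.getD w' [] ++ [p.1])) d) d).getD w []
      = d.getD w [] ++ ((ps.filter (fun p => (pvWords p.2).contains w)).map (·.1)) := by
  induction ps generalizing d with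
  | nil => simp
  | cons p ps ih =>
    simp only [List.foldl_cons, ih, pv_idx_inner, List.filter_cons]
    by_cases h : (pvWords p.2).contains w = true
    · have hm : w ∈ pvWords p.2 := by
        simpa using (PySem.Set.contains_iff _ _).mp h
      have hc : List.count w (pvWords p.2) = 1 :=
        List.count_eq_one_of_mem (PySem.Set.nodup_ofList _) hm
      rw [hc]
      simp [hm]
    · have hm : w ∉ pvWords p.2 := by
        intro hmem
        exact h ((PySem.Set.contains_iff _ _).mpr hmem)
      have hc : List.count w (pvWords p.2) = 0 := List.count_eq_zero_of_not_mem hm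
      rw [hc]
      simp [hm]

lemma pv_mem_pvIdx (chunks : List String) (w : String) (k : Nat) :
    ((k : Int) ∈ pvIdx chunks w) ↔ ∃ h : k < chunks.length, (pvWords chunks[k]).contains w = true := by
  unfold pvIdx
  simp only [List.mem_map, List.mem_filter, PySem.List.mem_enumerate_iff]
  constructor
  · rintro ⟨p, ⟨⟨m, hm, rfl⟩, hc⟩, hfst⟩
    simp only [zero_add] at hfst ⊢
    have : m = k := by exact_mod_cast hfst
    subst this
    exact ⟨hm, hc⟩
  · rintro ⟨h, hc⟩
    exact ⟨((k : Int), chunks[k]), ⟨⟨k, h, by simp⟩, hc⟩, rfl⟩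

lemma pv_pvIdx_nonneg (chunks : List String) (w : String) : ∀ i ∈ pvIdx chunks w, 0 ≤ i := by
  intro i hi
  unfold pvIdx at hi
  simp only [List.mem_map, List.mem_filter, PySem.List.mem_enumerate_iff] at hi
  obtain ⟨p, ⟨⟨m, hm, rfl⟩, -⟩, rfl⟩ := hi
  simp

lemma pv_pvIdx_nodup (chunks : List String) (w : String) : (pvIdx chunks w).Nodup := by
  unfold pvIdx
  have h1 : ((PySem.List.enumerate chunks).filter (fun p => (pvWords p.2).contains w)).Pairwise (fun p q => p.1 < q.1) :=
    List.Pairwise.filter _ (PySem.List.pairwise_lt_enumerate chunks 0)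
  have h2 := (List.pairwise_map (l := (PySem.List.enumerate chunks).filter (fun p => (pvWords p.2).contains w))
      (f := (·.1)) (R := fun a b => a ≠ b)).mpr
  exact h2 (h1.imp (fun h => ne_of_lt h))

lemma pv_tally_inner (js : List Int) (t : List Int) (k : Nat) (hpos : ∀ i ∈ js, 0 ≤ i) :
    (js.foldl (fun t i => t.modify i.toNat (· + 1)) t)[k]? = t[k]?.map (fun v => v + (js.count (k : Int) : Int)) := by
  induction js generalizing t with
  | nil => cases ht : t[k]? <;> simp [ht]
  | cons i js ih =>
    have hi : 0 ≤ i := hpos i (by simp)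
    have hrest : ∀ x ∈ js, 0 ≤ x := fun x hx => hpos x (by simp [hx])
    rw [List.foldl_cons, ih _ hrest, List.getElem?_modify, List.count_cons]
    by_cases h : i = (k : Int)
    · have hik : i.toNat = k := by omega
      subst h
      simp only [hik, beq_self_eq_true, if_pos]
      cases ht : t[k]?
      · simp
      · simp
        omega
    · have hik : i.toNat ≠ k := by omega
      have hne : ¬ ((i == (k:Int)) = true) := by simpa using h
      simp [hik, hne]

lemma pv_tally_spec (chunks : List String) (ws : List String) (t : List Int) (k : Nat) :
    (ws.foldl (fun t w => (pvIdx chunks w).foldl (fun t i => t.modify i.toNat (· + 1)) t) t)[k]?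
      = t[k]?.map (fun v => v + (ws.countP (fun w => decide ((k : Int) ∈ pvIdx chunks w)) : Int)) := by
  induction ws generalizing t with
  | nil => cases ht : t[k]? <;> simp [ht]
  | cons w ws ih =>
    rw [List.foldl_cons, ih, pv_tally_inner _ _ _ (pv_pvIdx_nonneg chunks w), List.countP_cons]
    have hcnt : (pvIdx chunks w).count (k : Int)
        = if (k : Int) ∈ pvIdx chunks w then 1 else 0 := by
      by_cases hm : (k : Int) ∈ pvIdx chunks w
      · simp [hm, List.count_eq_one_of_mem (pv_pvIdx_nodup chunks w) hm]
      · simp [hm, List.count_eq_zero_of_not_mem hm]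
    rw [hcnt]
    by_cases hm : (k : Int) ∈ pvIdx chunks w <;>
      · cases ht : t[k]? <;> simp [hm] ; try omega

-- B's tally is exactly the list of A's per-chunk overlaps
lemma pv_tally_eq (query : String) (chunks : List String) :
    ((pvWords query).foldl
      (fun (t : List Int) w => (((PySem.List.enumerate chunks).foldl
          (fun d p => (pvWords p.2).foldl (fun d w' => d.insert w' (d.getD w' [] ++ [p.1])) d)
          PySem.Dict.empty).getD w []).foldl
        (fun t i => t.modify i.toNat (· + 1)) t)
      (List.replicate chunks.length (0:Int)))
    = chunks.map (fun c => ((PySem.Set.inter (pvWords query) (pvWords c)).length : Int)) := by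
  have hidx : ∀ w, (((PySem.List.enumerate chunks).foldl
          (fun d p => (pvWords p.2).foldl (fun d w' => d.insert w' (d.getD w' [] ++ [p.1])) d)
          PySem.Dict.empty).getD w []) = pvIdx chunks w := by
    intro w
    rw [pv_idx_spec]
    simp [pvIdx]
  have hfold : ((pvWords query).foldl
      (fun (t : List Int) w => (((PySem.List.enumerate chunks).foldl
          (fun d p => (pvWords p.2).foldl (fun d w' => d.insert w' (d.getD w' [] ++ [p.1])) d)
          PySem.Dict.empty).getD w []).foldl
        (fun t i => t.modify i.toNat (· + 1)) t)
      (List.replicate chunks.length (0:Int)))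
    = ((pvWords query).foldl
      (fun (t : List Int) w => (pvIdx chunks w).foldl (fun t i => t.modify i.toNat (· + 1)) t)
      (List.replicate chunks.length (0:Int))) := by
    apply PySem.List.foldl_congr_mem
    intro t w _
    rw [hidx]
  refine hfold.trans ?_
  apply List.ext_getElem?
  intro k
  rw [pv_tally_spec, List.getElem?_map, List.getElem?_replicate]
  by_cases hk : k < chunks.length
  · rw [if_pos hk, List.getElem?_eq_getElem hk]
    simp only [Option.map_some, Option.some.injEq, zero_add]
    have : ((pvWords query).countP (fun w => decide ((k : Int) ∈ pvIdx chunks w)))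
        = ((PySem.Set.inter (pvWords query) (pvWords chunks[k])).length) := by
      rw [PySem.Set.inter, List.countP_eq_length_filter]
      apply congrArg List.length
      apply List.filter_congr
      intro w _
      by_cases hc : (pvWords chunks[k]).contains w = true
      · simp [(pv_mem_pvIdx chunks w k).mpr ⟨hk, hc⟩]
        exact (PySem.Set.contains_iff _ _).mp hc
      · have hnm : ¬ ((k : Int) ∈ pvIdx chunks w) := by
          intro hmem
          obtain ⟨h1, hcc⟩ := (pv_mem_pvIdx chunks w k).mp hmem
          exact hc hcc
        simp [hnm]
        exact fun hm => hc ((PySem.Set.contains_iff _ _).mpr hm)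
    rw [this]
  · rw [if_neg hk, List.getElem?_eq_none (by omega)]
    simp only [Option.map_none]

-- any chunk with positive overlap is a nonempty string (so A's 'if best_match:' test passes)
lemma pv_overlap_pos_ne_empty (q c : String) (h : 0 < ((PySem.Set.inter (pvWords q) (pvWords c)).length : Int)) : c ≠ "" := by
  intro hc
  subst hc
  have he : pvWords "" = [] := by decide
  rw [he] at h
  simp [PySem.Set.inter, PySem.Set.contains] at h

-- the two final scans agree (joint induction over the suffix of chunks)
lemma pv_scan (query : String) (chunks : List String) :
  ∀ (cs : List String) (k : Nat) (bm : Option String) (mx bi : Int),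
    chunks.drop k = cs →
    0 ≤ mx →
    ((bi = -1 ∧ bm = none) ∨
      (∃ (j : Nat) (c : String), bi = (j : Int) ∧ PySem.List.pyGet? chunks (j : Int) = some c ∧ bm = some c ∧ c ≠ "")) →
    (let Af := cs.foldl
        (fun (s : Option String × Int) chunk =>
          let chunk_words := pvWords chunk
          let overlap : Int := ((PySem.Set.inter (pvWords query) chunk_words).length : Int)
          if overlap > s.2 then (some chunk, overlap) else s) (bm, mx);
     let Bf := (PySem.List.enumerate (cs.map (fun c => ((PySem.Set.inter (pvWords query) (pvWords c)).length : Int))) (k : Int)).foldl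
        (fun (s : Int × Int) p => if p.2 > s.1 then (p.2, p.1) else s) (mx, bi);
     Af.2 = Bf.1 ∧ 0 ≤ Bf.1 ∧
      ((Bf.2 = -1 ∧ Af.1 = none) ∨
        (∃ (j : Nat) (c : String), Bf.2 = (j : Int) ∧ PySem.List.pyGet? chunks (j : Int) = some c ∧ Af.1 = some c ∧ c ≠ ""))) := by
  intro cs
  induction cs with
  | nil =>
    intro k bm mx bi hdrop hmx hinv
    exact ⟨rfl, hmx, hinv⟩
  | cons c cs ih =>
    intro k bm mx bi hdrop hmx hinv
    have hget : chunks[k]? = some c := by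
      have h0 : (chunks.drop k)[0]? = some c := by rw [hdrop]; rfl
      rw [List.getElem?_drop] at h0
      simpa using h0
    have hdrop' : chunks.drop (k + 1) = cs := by
      have h1 := congrArg List.tail hdrop
      simpa [List.tail_drop] using h1
    simp only [List.map_cons, PySem.List.enumerate_cons, List.foldl_cons]
    have hcast : (k : Int) + 1 = ((k + 1 : Nat) : Int) := by push_cast; ring
    rw [hcast]
    by_cases hgt : ((PySem.Set.inter (pvWords query) (pvWords c)).length : Int) > mx
    · have hpos : (0:Int) < ((PySem.Set.inter (pvWords query) (pvWords c)).length : Int) := lt_of_le_of_lt hmx hgt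
      have hne : c ≠ "" := pv_overlap_pos_ne_empty query c hpos
      rw [if_pos hgt, if_pos hgt]
      exact ih (k+1) (some c) _ (k:Int) hdrop' (le_of_lt hpos)
        (Or.inr ⟨k, c, rfl, by rw [PySem.List.pyGet?_natCast]; exact hget, rfl, hne⟩)
    · rw [if_neg hgt, if_neg hgt]
      exact ih (k+1) bm mx bi hdrop' hmx hinv

-- ===== VERDICT (by name: the statement is the Claim_ definition above) =====
theorem simple_qa_spec : Claim_equal_simple_qa := by
  intro query chunks _
  unfold Spec_simple_qa
  simp only [simple_qa, simple_qa_alt]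
  rw [pv_tally_eq]
  have h := pv_scan query chunks chunks 0 none 0 (-1) (by simp) (le_refl 0) (Or.inl ⟨rfl, rfl⟩)
  simp only [Nat.cast_zero] at h
  obtain ⟨h1, h2, h3⟩ := h
  rcases h3 with ⟨hB, hA⟩ | ⟨j, c, hB, hget, hA, hne⟩
  · rw [hA, hB]
    simp
  · rw [hA, hB, hget]
    show (if c ≠ "" then pvTrunc c else _) = _
    rw [if_pos hne, if_neg (show ¬((j:Int) < 0) by omega)]
    simp only [Option.getD_some]
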